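-- pv_equiv track=rewrite | github.com/shiwenli0908/Model-selection-using-deep-RL-for-multi-model-coding | MMC Code/Measures.py | my_bin
-- ===== SOURCE A (Python) =====
-- def my_bin(ind,b):
--     """
--
--
--     Parameters
--     ----------
--     ind : int
--         entié à représenter en binaire
--     b : int
--         Nombre de bits permettant de representer ind
--
--     Returns
--     -------
--     code : liste
--         liste de 1 et de 0 allant des poids faible au poids forts
--
--     """
--
--     q = -1
--     code = [0]*b
--
--     i=0
--     while i <b:
--         q = ind // 2
--         r = ind % 2
--         code[i]=int(r)
--         ind = q
--         i+=1
--     return code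
-- ===== SOURCE B (Python) =====
-- def my_bin(ind, b):
--     # Divide and conquer: split the b-bit field in half; the low h bits are the
--     # representation of ind mod 2**h and the high b-h bits that of ind >> h.
--     if b <= 0:
--         return []
--     if b == 1:
--         return [ind % 2]
--     h = b // 2
--     return my_bin(ind % (1 << h), h) + my_bin(ind >> h, b - h)
-- ===== Notes on version B (the rewrite author's own statement) =====
-- stated objective: alternative
-- what changed: Replaces the linear while loop threading a mutated quotient accumulator with a recursive divide-and-conquer: the b-bit field is split in half, the low half encoded from ind mod 2**h and the high half from ind >> h, and the two lists concatenated.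
import Mathlib
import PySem

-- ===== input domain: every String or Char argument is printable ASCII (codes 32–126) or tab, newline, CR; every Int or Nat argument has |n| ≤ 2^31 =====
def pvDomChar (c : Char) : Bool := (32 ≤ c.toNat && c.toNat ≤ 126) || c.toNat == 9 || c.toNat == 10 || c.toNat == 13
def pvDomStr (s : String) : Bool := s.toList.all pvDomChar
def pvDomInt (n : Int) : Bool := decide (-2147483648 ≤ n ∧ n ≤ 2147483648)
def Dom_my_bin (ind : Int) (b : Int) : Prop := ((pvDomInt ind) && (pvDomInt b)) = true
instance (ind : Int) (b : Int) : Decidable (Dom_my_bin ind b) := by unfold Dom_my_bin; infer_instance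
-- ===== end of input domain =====

-- B replaces A's while loop (a mutated quotient threaded through a preallocated list)
-- by divide and conquer: the b-bit field is split in half, the low half encoded from
-- ind mod 2**h, the high half from ind >> h, and the two lists concatenated (objective: alternative).

-- ===== PORT A =====
-- the while loop: state (ind, i, code); q/r are the floor quotient and remainder of ind by 2
def myBinLoop (ind : Int) (b : Int) (i : Int) (code : List Int) : List Int :=
  if _h : i < b then
    myBinLoop (PySem.Int.floordiv ind 2) b (i + 1) (code.set i.toNat (PySem.Int.mod ind 2))
  else code
termination_by (b - i).toNat
decreasing_by omega

def my_bin (ind : Int) (b : Int) : List Int :=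
  myBinLoop ind b 0 (List.replicate b.toNat 0)

-- ===== PORT B =====
-- divide and conquer; '1 << h' is (1 : Int) <<< h.toNat, 'ind >> h' is ind >>> h.toNat
def my_bin_alt (ind : Int) (b : Int) : List Int :=
  if b ≤ 0 then []
  else if b = 1 then [PySem.Int.mod ind 2]
  else
    let h := PySem.Int.floordiv b 2
    my_bin_alt (PySem.Int.mod ind ((1:Int) <<< h.toNat)) h ++
      my_bin_alt (ind >>> h.toNat) (b - h)
termination_by b.toNat
decreasing_by
  · have : PySem.Int.floordiv b 2 = b / 2 := PySem.Int.floordiv_eq_ediv_of_pos (by norm_num)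
    simp only [this]; omega
  · have : PySem.Int.floordiv b 2 = b / 2 := PySem.Int.floordiv_eq_ediv_of_pos (by norm_num)
    simp only [this]; omega

-- ===== PRECONDITION & SPEC =====
def Spec_my_bin (ind : Int) (b : Int) (out : List Int) : Prop := out = my_bin_alt ind b
instance (ind : Int) (b : Int) (out : List Int) : Decidable (Spec_my_bin ind b out) := by unfold Spec_my_bin; infer_instance

-- ===== CLAIM (what is proved, stated in full; the proofs are below) =====
def Claim_equal_my_bin : Prop := ∀ (ind : Int) (b : Int), Dom_my_bin ind b → Spec_my_bin ind b (my_bin ind b)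

-- ===== LEMMAS AND PROOFS =====

-- the common characterisation: bit k of the answer is (ind / 2^k) % 2
def bitsOf (ind : Int) (n : Nat) : List Int :=
  (List.range n).map (fun k => (ind / 2 ^ k) % 2)

lemma sr_eq_div (m : Int) (n : Nat) : Int.shiftRight m n = m / 2 ^ n :=
  Int.shiftRight_eq_div_pow m n

lemma floordiv_two_eq_shiftRight (m : Int) : PySem.Int.floordiv m 2 = Int.shiftRight m 1 := by
  rw [PySem.Int.floordiv_eq_ediv_of_pos (by norm_num), sr_eq_div]
  norm_num

lemma shiftRight_succ_eq (m : Int) (k : Nat) :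
    Int.shiftRight m (k + 1) = Int.shiftRight (Int.shiftRight m 1) k := by
  rw [sr_eq_div, sr_eq_div, sr_eq_div]
  rw [pow_succ, pow_one, mul_comm]
  exact (Int.ediv_ediv_of_nonneg (by norm_num : (0:Int) ≤ 2)).symm

lemma set_take_succ : ∀ (code : List Int) (k : Nat) (v : Int), k < code.length →
    (code.set k v).take (k + 1) = code.take k ++ [v] := by
  intro code
  induction code with
  | nil => intro k v hk; simp at hk
  | cons c cs ih =>
    intro k v hk
    cases k with
    | zero => simp
    | succ k => simp [ih k v (by simpa using hk)]

-- A's loop invariant: with i ≥ 0, n iterations left and code exactly long enough,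
-- the loop returns the untouched prefix followed by the bits of the current ind
lemma myBinLoop_eq (n : Nat) : ∀ (ind b i : Int) (code : List Int),
    0 ≤ i → (b - i).toNat = n → code.length = i.toNat + n →
    myBinLoop ind b i code
      = code.take i.toNat
        ++ (List.range n).map (fun k : Nat => PySem.Int.mod (Int.shiftRight ind k) 2) := by
  induction n with
  | zero =>
    intro ind b i code hi hn hlen
    rw [myBinLoop, dif_neg (by omega)]
    simp [List.take_of_length_le (by omega : code.length ≤ i.toNat)]
  | succ n ih =>
    intro ind b i code hi hn hlen
    rw [myBinLoop, dif_pos (by omega)]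
    rw [ih (PySem.Int.floordiv ind 2) b (i + 1) _ (by omega) (by omega)
        (by simp [List.length_set, hlen]; omega)]
    have h1 : (i + 1).toNat = i.toNat + 1 := by omega
    rw [h1, set_take_succ code i.toNat (PySem.Int.mod ind 2) (by omega), List.append_assoc]
    congr 1
    rw [List.range_succ_eq_map, List.map_cons, List.map_map, List.singleton_append]
    congr 1
    · simp [sr_eq_div]
    · apply List.map_congr_left
      intro k _
      simp only [Function.comp_apply, Nat.succ_eq_add_one]
      rw [shiftRight_succ_eq, floordiv_two_eq_shiftRight]

lemma my_bin_eq_bitsOf (ind b : Int) : my_bin ind b = bitsOf ind b.toNat := by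
  unfold my_bin bitsOf
  rw [myBinLoop_eq b.toNat ind b 0 _ le_rfl (by omega) (by simp)]
  simp only [Int.toNat_zero, List.take_zero, List.nil_append]
  apply List.map_congr_left
  intro k _
  rw [sr_eq_div, PySem.Int.mod_eq_emod_of_pos (by norm_num)]

-- bit k of any x equals the k-th digit of x mod 2^(k+1)
lemma bit_eq_mod_div (x : Int) (k : Nat) : (x / 2 ^ k) % 2 = x % 2 ^ (k + 1) / 2 ^ k := by
  have h : x % 2 ^ (k + 1) = x + (-(2 * (x / 2 ^ (k + 1)))) * 2 ^ k := by
    rw [Int.emod_def, pow_succ]; ring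
  rw [h, Int.add_mul_ediv_right _ _ (by positivity : (2:Int) ^ k ≠ 0)]
  have h2 : x / 2 ^ (k + 1) = x / 2 ^ k / 2 := by
    rw [pow_succ]
    exact (Int.ediv_ediv_of_nonneg (by positivity : (0:Int) ≤ 2 ^ k)).symm
  rw [h2]
  omega

-- a bit below the cut is unchanged by reducing mod 2^h
lemma bit_mod_low (x : Int) (h k : Nat) (hk : k < h) :
    (x % 2 ^ h / 2 ^ k) % 2 = (x / 2 ^ k) % 2 := by
  rw [bit_eq_mod_div, bit_eq_mod_div x k,
    Int.emod_emod_of_dvd x (pow_dvd_pow 2 (by omega : k + 1 ≤ h))]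

-- a bit above the cut is a bit of the shifted value
lemma bit_shift_high (x : Int) (h k : Nat) :
    (x >>> h) / 2 ^ k = x / 2 ^ (h + k) := by
  show Int.shiftRight x h / 2 ^ k = _
  rw [sr_eq_div, Int.ediv_ediv_of_nonneg (by positivity : (0:Int) ≤ 2 ^ h), pow_add]

lemma one_shiftLeft_int (n : Nat) : (1:Int) <<< n = 2 ^ n := by
  have := Int.shiftLeft_eq (1:Int) n
  simpa using this

-- B computes the same bits, by strong induction on b.toNat
lemma my_bin_alt_eq_bitsOf : ∀ (n : Nat) (ind b : Int), b.toNat = n →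
    my_bin_alt ind b = bitsOf ind b.toNat := by
  intro n
  induction n using Nat.strong_induction_on with
  | _ n ih =>
    intro ind b hn
    rw [my_bin_alt]
    by_cases hb0 : b ≤ 0
    · rw [if_pos hb0]
      have : b.toNat = 0 := by omega
      simp [this, bitsOf]
    · rw [if_neg hb0]
      by_cases hb1 : b = 1
      · rw [if_pos hb1, hb1]
        simp [bitsOf, List.range_succ]
      · rw [if_neg hb1]
        have hb2 : 2 ≤ b := by omega
        have hdiv : PySem.Int.floordiv b 2 = b / 2 :=
          PySem.Int.floordiv_eq_ediv_of_pos (by norm_num)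
        simp only [hdiv]
        set h : Int := b / 2 with hh
        have hhb : 1 ≤ h ∧ h < b := by constructor <;> omega
        rw [ih (h.toNat) (by omega) _ h rfl,
            ih ((b - h).toNat) (by omega) _ (b - h) rfl]
        rw [one_shiftLeft_int, PySem.Int.mod_eq_emod_of_pos (by positivity)]
        -- assemble: bits of (ind % 2^h) for the low half, bits of (ind >>> h) for the high
        have hsplit : b.toNat = h.toNat + (b - h).toNat := by omega
        unfold bitsOf
        rw [hsplit, List.range_add, List.map_append, List.map_map]
        congr 1
        · apply List.map_congr_left
          intro k hk
          simp only [List.mem_range] at hk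
          exact bit_mod_low ind h.toNat k hk
        · apply List.map_congr_left
          intro k _
          simp only [Function.comp_apply]
          rw [bit_shift_high]

-- ===== VERDICT (by name: the statement is the Claim_ definition above) =====
theorem my_bin_spec : Claim_equal_my_bin := by
  intro ind b _
  unfold Spec_my_bin
  rw [my_bin_eq_bitsOf, my_bin_alt_eq_bitsOf b.toNat ind b rfl]
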